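-- pv_equiv track=rewrite | github.com/mmm-da/archive | 2020/digital_auto/course-work/source/calculator_TCA (2).py | get_lst_str_set_of_full
-- ===== SOURCE A (Python) =====
-- inv_char = "!"
--
-- t_num = 3       #количество бит t
--
-- def get_implicanta_str(implicanta):
--     res_str = ""
--     for k in range(len(implicanta)):
--         res_str += (inv_char if not(implicanta[k]) else "") + ("t" if (k < t_num) else "x") +  (str(k + 1) if (k < t_num) else str(k+1-t_num))
--     return res_str
--
-- def get_lst_str_set_of_full(func_lst):
--     included = []
--     included_in = []
--     count = 1
--     res_str = ""
--     for i in range(len(func_lst)):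
--         for implicanta in func_lst[i]:
--             if included.count(implicanta) == 0:
--                 included.append(implicanta)
--                 implicanta_str = str(count) + ". " + get_implicanta_str(implicanta) + " (" + str(i+1)
--                 count += 1
--                 tmp = [i]
--                 for j in range(i + 1, len(func_lst)):
--                     if func_lst[j].count(implicanta) > 0:
--                         implicanta_str += "," + str(j+1)
--                         tmp.append(j)
--                 implicanta_str += ")"
--                 res_str += "   " + implicanta_str
--                 included_in.append(tmp)
--     return included, included_in, res_str
--
-- k = 1
-- ===== SOURCE B (Python) =====
-- inv_char = "!"
-- t_num = 3
--
--
-- def get_lst_str_set_of_full(func_lst):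
--     # First pass: build an insertion-ordered index implicanta -> list of set indices.
--     index = {}
--     for i, fset in enumerate(func_lst):
--         for imp in fset:
--             key = tuple(imp)
--             if key in index:
--                 entry = index[key]
--                 if entry[1][-1] != i:
--                     entry[1].append(i)
--             else:
--                 index[key] = (imp, [i])
--     # Second pass: emit everything from the index, in insertion order.
--     included = []
--     included_in = []
--     parts = []
--     n = 1
--     for imp, idxs in index.values():
--         included.append(imp)
--         included_in.append(idxs)
--         lit = "".join(
--             (inv_char if not b else "")
--             + ("t" + str(k + 1) if k < t_num else "x" + str(k + 1 - t_num))
--             for k, b in enumerate(imp)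
--         )
--         parts.append("   " + str(n) + ". " + lit + " (" + ",".join(str(j + 1) for j in idxs) + ")")
--         n += 1
--     return included, included_in, "".join(parts)
-- ===== Notes on version B (the rewrite author's own statement) =====
-- stated objective: faster
-- what changed: A rescans all later function sets (and re-counts the seen-list) for every newly seen implicanta; B builds an insertion-ordered dict implicanta -> index list in one pass over all (index, set) pairs and emits the three outputs in a second pass over that index, so all inner rescans disappear.
import Mathlib
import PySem

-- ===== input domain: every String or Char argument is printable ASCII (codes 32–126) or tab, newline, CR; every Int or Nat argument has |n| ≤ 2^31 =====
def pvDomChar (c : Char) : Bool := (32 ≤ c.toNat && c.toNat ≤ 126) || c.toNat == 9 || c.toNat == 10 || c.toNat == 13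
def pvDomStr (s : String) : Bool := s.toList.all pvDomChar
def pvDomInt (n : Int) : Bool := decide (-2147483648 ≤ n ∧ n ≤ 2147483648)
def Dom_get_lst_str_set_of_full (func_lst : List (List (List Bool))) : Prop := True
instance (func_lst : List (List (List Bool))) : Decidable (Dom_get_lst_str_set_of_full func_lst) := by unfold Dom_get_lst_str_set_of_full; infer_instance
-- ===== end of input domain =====

-- B replaces A's repeated forward rescans of later function sets with a single pass building an
-- insertion-ordered dict (implicanta -> list of set indices) followed by one emission pass over
-- that index; equivalence of the return values is proved for every input.

-- ===== PORT A =====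
def implicantaChars (implicanta : List Bool) : List Char :=
  (PySem.List.pyRange 0 (PySem.List.len implicanta) 1).foldl (fun res k =>
    res ++ ((if !(PySem.List.pyGetD implicanta k false) then ['!'] else []) ++
      (if k < 3 then ['t'] else ['x']) ++
      (if k < 3 then PySem.Int.toChars (k + 1) else PySem.Int.toChars (k + 1 - 3)))) []

def aInner (func_lst : List (List (List Bool))) (i : Int)
    (st : List (List Bool) × List (List Int) × Int × List Char) (imp : List Bool) :
    List (List Bool) × List (List Int) × Int × List Char :=
  if st.1.count imp = 0 then
    let imp_str := PySem.Int.toChars st.2.2.1 ++ '.' :: ' ' :: implicantaChars imp ++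
      ' ' :: '(' :: PySem.Int.toChars (i + 1)
    let p := (PySem.List.pyRange (i + 1) (PySem.List.len func_lst) 1).foldl
      (fun (p : List Char × List Int) j =>
        if 0 < (PySem.List.pyGetD func_lst j ([] : List (List Bool))).count imp then
          (p.1 ++ ',' :: PySem.Int.toChars (j + 1), p.2 ++ [j])
        else p) (imp_str, [i])
    (st.1 ++ [imp], st.2.1 ++ [p.2], st.2.2.1 + 1, st.2.2.2 ++ ' ' :: ' ' :: ' ' :: (p.1 ++ [')']))
  else st

def aOuter (func_lst : List (List (List Bool)))
    (st : List (List Bool) × List (List Int) × Int × List Char) (i : Int) :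
    List (List Bool) × List (List Int) × Int × List Char :=
  (PySem.List.pyGetD func_lst i ([] : List (List Bool))).foldl (aInner func_lst i) st

def get_lst_str_set_of_full (func_lst : List (List (List Bool))) :
    List (List Bool) × List (List Int) × String :=
  let st := (PySem.List.pyRange 0 (PySem.List.len func_lst) 1).foldl (aOuter func_lst)
    (([] : List (List Bool)), ([] : List (List Int)), (1 : Int), ([] : List Char))
  (st.1, st.2.1, String.ofList st.2.2.2)

-- ===== PORT B =====
def bInner (i : Int) (d : PySem.Dict (List Bool) (List Bool × List Int)) (imp : List Bool) :
    PySem.Dict (List Bool) (List Bool × List Int) :=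
  if d.contains imp then
    let entry := d.getD imp (imp, [])
    if PySem.List.pyGetD entry.2 (-1) 0 ≠ i then d.insert imp (entry.1, entry.2 ++ [i]) else d
  else d.insert imp (imp, [i])

def bOuter (d : PySem.Dict (List Bool) (List Bool × List Int))
    (q : Int × List (List Bool)) : PySem.Dict (List Bool) (List Bool × List Int) :=
  q.2.foldl (bInner q.1) d

def bEmit (st : List (List Bool) × List (List Int) × List (List Char) × Int)
    (v : List Bool × List Int) : List (List Bool) × List (List Int) × List (List Char) × Int :=
  let lit := (PySem.List.enumerate v.1 0).foldl (fun acc kb =>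
    acc ++ ((if !kb.2 then ['!'] else []) ++
      (if kb.1 < 3 then 't' :: PySem.Int.toChars (kb.1 + 1)
       else 'x' :: PySem.Int.toChars (kb.1 + 1 - 3)))) []
  (st.1 ++ [v.1], st.2.1 ++ [v.2],
   st.2.2.1 ++ [' ' :: ' ' :: ' ' :: (PySem.Int.toChars st.2.2.2 ++ '.' :: ' ' :: lit ++
     ' ' :: '(' :: PySem.Chars.join [','] (v.2.map (fun j => PySem.Int.toChars (j + 1))) ++ [')'])],
   st.2.2.2 + 1)

def bFinish (st : List (List Bool) × List (List Int) × List (List Char) × Int) :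
    List (List Bool) × List (List Int) × String :=
  (st.1, st.2.1, String.ofList (PySem.Chars.join [] st.2.2.1))

def get_lst_str_set_of_full_alt (func_lst : List (List (List Bool))) :
    List (List Bool) × List (List Int) × String :=
  bFinish (((PySem.List.enumerate func_lst 0).foldl bOuter PySem.Dict.empty).values.foldl bEmit
    (([] : List (List Bool)), ([] : List (List Int)), ([] : List (List Char)), (1 : Int)))


-- ===== PRECONDITION & SPEC =====
def Spec_get_lst_str_set_of_full (func_lst : List (List (List Bool))) (out : List (List Bool) × List (List Int) × String) : Prop := out = get_lst_str_set_of_full_alt func_lst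
instance (func_lst : List (List (List Bool))) (out : List (List Bool) × List (List Int) × String) : Decidable (Spec_get_lst_str_set_of_full func_lst out) := by unfold Spec_get_lst_str_set_of_full; infer_instance

-- ===== CLAIM (what is proved, stated in full; the proofs are below) =====
def Claim_equal_get_lst_str_set_of_full : Prop := ∀ (func_lst : List (List (List Bool))), Dom_get_lst_str_set_of_full func_lst → Spec_get_lst_str_set_of_full func_lst (get_lst_str_set_of_full func_lst)

-- ===== LEMMAS AND PROOFS =====
-- ===== proof-side definitions =====
def occAux : List (List (List Bool)) → Int → List Bool → List Int
  | [], _, _ => []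
  | l :: r, s, imp => (if 0 < l.count imp then [s] else []) ++ occAux r (s + 1) imp

def chunk (c : Int) (imp : List Bool) (o : List Int) : List Char :=
  ' ' :: ' ' :: ' ' :: (PySem.Int.toChars c ++ '.' :: ' ' :: implicantaChars imp ++
    ' ' :: '(' :: PySem.Chars.join [','] (o.map (fun j => PySem.Int.toChars (j + 1))) ++ [')'])

def chunkList : List (List Bool × List Int) → Int → List (List Char)
  | [], _ => []
  | p :: r, c => chunk c p.1 p.2 :: chunkList r (c + 1)

def pairsOf (L : List (List (List Bool))) : List (List Bool × List Int) :=
  (PySem.Set.ofList L.flatten).map (fun imp => (imp, occAux L 0 imp))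

def mkStA (L : List (List (List Bool))) (ks : List (List Bool)) :
    List (List Bool) × List (List Int) × Int × List Char :=
  (ks, ks.map (occAux L 0), (ks.length : Int) + 1,
   (chunkList (ks.map (fun imp => (imp, occAux L 0 imp))) 1).flatten)

def dictOf (P : List (List (List Bool))) : PySem.Dict (List Bool) (List Bool × List Int) :=
  PySem.Dict.mk ((PySem.Set.ofList P.flatten).map (fun imp => (imp, (imp, occAux P 0 imp))))

-- ===== generic lemmas =====
lemma occ_append (X Y : List (List (List Bool))) (imp : List Bool) : ∀ (s : Int),
    occAux (X ++ Y) s imp = occAux X s imp ++ occAux Y (s + X.length) imp := by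
  induction X with
  | nil => intro s; simp [occAux]
  | cons l r ih =>
      intro s
      simp only [List.cons_append, occAux, ih (s+1), List.append_assoc, List.length_cons]
      congr 2
      push_cast; ring

lemma occ_nil_iff (M : List (List (List Bool))) (imp : List Bool) : ∀ (s : Int),
    occAux M s imp = [] ↔ imp ∉ M.flatten := by
  induction M with
  | nil => intro s; simp [occAux]
  | cons l r ih =>
      intro s
      simp only [occAux, List.flatten_cons, List.append_eq_nil_iff, List.mem_append, ih]
      constructor
      · rintro ⟨h1, h2⟩ (h | h)
        · rw [if_pos (List.count_pos_iff.mpr h)] at h1; simp at h1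
        · exact h2 h
      · intro h
        refine ⟨?_, fun hm => h (Or.inr hm)⟩
        rw [if_neg (fun hc => h (Or.inl (List.count_pos_iff.mp hc)))]

lemma occ_bounds (imp : List Bool) : ∀ (M : List (List (List Bool))) (s x : Int),
    x ∈ occAux M s imp → s ≤ x ∧ x < s + M.length := by
  intro M
  induction M with
  | nil => intro s x h; simp [occAux] at h
  | cons l r ih =>
      intro s x h
      simp only [occAux, List.mem_append] at h
      have hlen : ((l :: r).length : Int) = (r.length : Int) + 1 := by
        simp [List.length_cons]
      have hr : (0:Int) ≤ (r.length : Int) := by positivity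
      rcases h with h | h
      · split at h <;> simp at h
        subst h
        omega
      · have := ih (s+1) x h
        omega

lemma chunkList_append (ps qs : List (List Bool × List Int)) : ∀ (c : Int),
    chunkList (ps ++ qs) c = chunkList ps c ++ chunkList qs (c + ps.length) := by
  induction ps with
  | nil => intro c; simp [chunkList]
  | cons p r ih =>
      intro c
      simp only [List.cons_append, chunkList, ih (c+1), List.length_cons]
      congr 3
      push_cast; ring

lemma join_comma_cons (x : List Char) (xs : List (List Char)) (s : List Char) :
    PySem.Chars.join s (x :: xs) = x ++ xs.flatMap (fun y => s ++ y) := by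
  induction xs generalizing x with
  | nil => simp [PySem.Chars.join_singleton]
  | cons y ys ih => simp [PySem.Chars.join_cons_cons, ih, List.flatMap_cons]

lemma join_nil_flatten (ps : List (List Char)) : PySem.Chars.join [] ps = ps.flatten := by
  cases ps with
  | nil => simp [PySem.Chars.join_nil]
  | cons x xs => simp [join_comma_cons, List.flatMap_def]

lemma occ_eq_filter (L : List (List (List Bool))) (imp : List Bool) :
    ∀ (M : List (List (List Bool))) (a : Nat), L.drop a = M →
    (PySem.List.pyRange (a : Int) (L.length : Int) 1).filter
      (fun j => decide (0 < (PySem.List.pyGetD L j ([] : List (List Bool))).count imp)) =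
      occAux M (a : Int) imp := by
  intro M
  induction M with
  | nil =>
      intro a h
      have : L.length ≤ a := by
        by_contra hc
        push_neg at hc
        have := List.drop_eq_nil_iff.mp h
        omega
      rw [PySem.List.pyRange_one_eq_nil (by exact_mod_cast this)]
      simp [occAux]
  | cons l r ih =>
      intro a h
      have ha : a < L.length := by
        by_contra hc
        push_neg at hc
        rw [List.drop_eq_nil_iff.mpr hc] at h
        simp at h
      have hget : L[a] = l := by
        have := congrArg (fun t => t.head?) h
        simpa [List.head?_drop, List.getElem?_eq_getElem ha] using this
      rw [PySem.List.pyRange_one_cons (by exact_mod_cast ha), List.filter_cons]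
      have hgd : PySem.List.pyGetD L (a : Int) ([] : List (List Bool)) = l := by
        simp [PySem.List.pyGetD_natCast, List.getD_eq_getElem?_getD,
          List.getElem?_eq_getElem ha, hget]
      have hdrop : L.drop (a + 1) = r := by
        have := congrArg List.tail h
        simpa [List.tail_drop] using this
      have ihr := ih (a + 1) hdrop
      push_cast at ihr
      rw [hgd]
      by_cases hc : 0 < l.count imp
      · simp only [hc, decide_true, if_pos trivial, occAux]
        rw [ihr]
        simp
      · simp only [occAux, if_neg hc]
        simp only [decide_eq_true_eq, hc, if_false]
        rw [ihr]
        simp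

lemma foldl_pair_filter (u : Int → List Char) (q : Int → Prop) [DecidablePred q] :
    ∀ (R : List Int) (s1 : List Char) (s2 : List Int),
    R.foldl (fun p j => if q j then (p.1 ++ u j, p.2 ++ [j]) else p) (s1, s2)
    = (s1 ++ (R.filter (fun j => decide (q j))).flatMap u,
       s2 ++ R.filter (fun j => decide (q j))) := by
  intro R
  induction R with
  | nil => intro s1 s2; simp
  | cons j R ih =>
      intro s1 s2
      by_cases hq : q j
      · simp [List.foldl_cons, hq, ih]
      · simp [List.foldl_cons, hq, ih]

lemma chunk_cons (c : Int) (imp : List Bool) (a : Int) (rest : List Int) :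
    chunk c imp (a :: rest) =
    ' ' :: ' ' :: ' ' :: ((PySem.Int.toChars c ++ '.' :: ' ' :: implicantaChars imp ++
      ' ' :: '(' :: PySem.Int.toChars (a + 1) ++
      rest.flatMap (fun j => ',' :: PySem.Int.toChars (j + 1))) ++ [')']) := by
  have hfm : (rest.map (fun j => PySem.Int.toChars (j + 1))).flatMap
      (fun y => ',' :: y) = rest.flatMap (fun j => ',' :: PySem.Int.toChars (j + 1)) := by
    rw [List.flatMap_map]
  simp [chunk, List.map_cons, join_comma_cons, hfm]

lemma occ_first (L : List (List (List Bool))) (a : Nat) (ha : a < L.length)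
    (imp : List Bool) (hα : imp ∉ (L.take a).flatten) (himpa : imp ∈ L[a]) :
    occAux L 0 imp = (a : Int) :: occAux (L.drop (a + 1)) ((a : Int) + 1) imp := by
  have h0 : occAux (L.take a) 0 imp = [] := (occ_nil_iff _ _ _).mpr hα
  have hlen : ((L.take a).length : Int) = (a : Int) := by
    simp [List.length_take, Nat.min_eq_left ha.le]
  conv_lhs => rw [← List.take_append_drop a L]
  rw [occ_append, h0, hlen]
  simp only [List.nil_append, zero_add]
  rw [← List.getElem_cons_drop ha]
  simp only [occAux, if_pos (List.count_pos_iff.mpr himpa)]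
  norm_num

lemma aInner_step (L : List (List (List Bool))) (a : Nat) (ha : a < L.length)
    (done : List (List Bool)) (imp : List Bool) (himpa : imp ∈ L[a]) :
    aInner L (a : Int) (mkStA L (PySem.Set.ofList ((L.take a).flatten ++ done))) imp
    = mkStA L (PySem.Set.ofList ((L.take a).flatten ++ (done ++ [imp]))) := by
  have hset : PySem.Set.ofList ((L.take a).flatten ++ (done ++ [imp]))
      = PySem.Set.add (PySem.Set.ofList ((L.take a).flatten ++ done)) imp := by
    rw [← List.append_assoc, PySem.Set.ofList_append_singleton]
  by_cases hmem : imp ∈ PySem.Set.ofList ((L.take a).flatten ++ done)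
  · have hcount : ¬ (PySem.Set.ofList ((L.take a).flatten ++ done)).count imp = 0 := by
      have := List.count_pos_iff.mpr hmem
      omega
    rw [hset, PySem.Set.add_of_mem hmem]
    simp only [aInner, mkStA]
    rw [if_neg hcount]
  · have hcount : (PySem.Set.ofList ((L.take a).flatten ++ done)).count imp = 0 :=
      List.count_eq_zero.mpr hmem
    have hα : imp ∉ (L.take a).flatten := fun h =>
      hmem ((PySem.Set.mem_ofList _ _).mpr (List.mem_append_left _ h))
    have hβ := occ_first L a ha imp hα himpa
    have hfilter := occ_eq_filter L imp (L.drop (a + 1)) (a + 1) rfl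
    push_cast at hfilter
    rw [hset, PySem.Set.add_of_not_mem hmem]
    set S := PySem.Set.ofList ((L.take a).flatten ++ done) with hS
    simp only [aInner, mkStA]
    rw [if_pos hcount]
    have hscan := foldl_pair_filter (fun j => ',' :: PySem.Int.toChars (j + 1))
      (fun j => 0 < (PySem.List.pyGetD L j ([] : List (List Bool))).count imp)
      (PySem.List.pyRange ((a : Int) + 1) (L.length : Int) 1)
      (PySem.Int.toChars ((S.length : Int) + 1) ++ '.' :: ' ' :: implicantaChars imp ++
        ' ' :: '(' :: PySem.Int.toChars ((a : Int) + 1)) [(a : Int)]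
    simp only [PySem.List.len_eq]
    rw [hscan, hfilter]
    have hchunk : (chunkList ((S ++ [imp]).map (fun imp => (imp, occAux L 0 imp))) 1).flatten
        = (chunkList (S.map (fun imp => (imp, occAux L 0 imp))) 1).flatten ++
          chunk ((S.length : Int) + 1) imp (occAux L 0 imp) := by
      rw [List.map_append, chunkList_append]
      simp [chunkList, add_comm]
    rw [hchunk, hβ, chunk_cons]
    simp [List.append_assoc]
    exact hβ.symm

lemma aInner_fold (L : List (List (List Bool))) (a : Nat) (ha : a < L.length) :
    ∀ (fset done : List (List Bool)), (∀ x ∈ fset, x ∈ L[a]) →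
    fset.foldl (aInner L (a : Int)) (mkStA L (PySem.Set.ofList ((L.take a).flatten ++ done))) =
    mkStA L (PySem.Set.ofList ((L.take a).flatten ++ (done ++ fset))) := by
  intro fset
  induction fset with
  | nil => intro done _; simp
  | cons imp rest ih =>
      intro done hf
      rw [List.foldl_cons, aInner_step L a ha done imp (hf imp (by simp))]
      rw [ih (done ++ [imp]) (fun x hx => hf x (List.mem_cons_of_mem _ hx))]
      simp

lemma aOuter_fold (L : List (List (List Bool))) :
    ∀ (k a : Nat), a + k = L.length →
    (PySem.List.pyRange (a : Int) (L.length : Int) 1).foldl (aOuter L)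
      (mkStA L (PySem.Set.ofList (L.take a).flatten)) =
    mkStA L (PySem.Set.ofList L.flatten) := by
  intro k
  induction k with
  | zero =>
      intro a h
      have hle : (L.length : Int) ≤ (a : Int) := by exact_mod_cast Nat.le_of_eq (by omega)
      rw [PySem.List.pyRange_one_eq_nil hle]
      rw [List.foldl_nil, List.take_of_length_le (by omega)]
  | succ k ih =>
      intro a h
      have ha : a < L.length := by omega
      rw [PySem.List.pyRange_one_cons (by exact_mod_cast ha), List.foldl_cons]
      have hgd : PySem.List.pyGetD L (a : Int) ([] : List (List Bool)) = L[a] := by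
        simp [PySem.List.pyGetD_natCast, List.getD_eq_getElem?_getD, List.getElem?_eq_getElem ha]
      have htake : (L.take (a + 1)).flatten = (L.take a).flatten ++ L[a] := by
        have h1 : L.take (a + 1) = L.take a ++ [L[a]] := by
          rw [List.take_add_one, List.getElem?_eq_getElem ha]
          simp
        rw [h1, List.flatten_append]
        simp
      have hstep : aOuter L (mkStA L (PySem.Set.ofList (L.take a).flatten)) (a : Int)
          = mkStA L (PySem.Set.ofList (L.take (a + 1)).flatten) := by
        unfold aOuter
        rw [hgd]
        have h2 := aInner_fold L a ha (L[a]) [] (fun x hx => hx)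
        simpa [htake] using h2
      rw [hstep]
      have hcast : (a : Int) + 1 = ((a + 1 : Nat) : Int) := by push_cast; ring
      rw [hcast]
      exact ih (a + 1) (by omega)

lemma A_eq (L : List (List (List Bool))) :
    get_lst_str_set_of_full L
    = (PySem.Set.ofList L.flatten, (PySem.Set.ofList L.flatten).map (occAux L 0),
       String.ofList ((chunkList (pairsOf L) 1).flatten)) := by
  have h0 := aOuter_fold L L.length 0 (by omega)
  simp only [Nat.cast_zero] at h0
  have hinit : mkStA L (PySem.Set.ofList ((L.take 0).flatten))
      = (([] : List (List Bool)), ([] : List (List Int)), (1 : Int), ([] : List Char)) := by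
    simp [mkStA, chunkList]
  rw [hinit] at h0
  unfold get_lst_str_set_of_full
  simp only [PySem.List.len_eq]
  rw [h0]
  simp [mkStA, pairsOf]

def mkDict (P : List (List (List Bool))) (done : List (List Bool)) :
    PySem.Dict (List Bool) (List Bool × List Int) :=
  PySem.Dict.mk ((PySem.Set.ofList (P.flatten ++ done)).map
    (fun k => (k, (k, occAux P 0 k ++ if 0 < done.count k then [(P.length : Int)] else []))))

lemma get?_mk_map (ks : List (List Bool)) (f : List Bool → List Bool × List Int)
    (hnd : ks.Nodup) (x : List Bool) :
    (PySem.Dict.mk (ks.map (fun k => (k, f k)))).get? x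
    = if x ∈ ks then some (f x) else none := by
  induction ks with
  | nil =>
      have : (PySem.Dict.mk ([] : List (List Bool × (List Bool × List Int)))) =
        PySem.Dict.empty := rfl
      simp [this, PySem.Dict.get?_empty]
  | cons k ks ih =>
      rw [List.map_cons, PySem.Dict.get?_mk_cons]
      by_cases hx : k = x
      · subst hx
        simp
      · have hne : (k == x) = false := by simp [hx]
        rw [hne]
        simp only [Bool.false_eq_true, if_false]
        rw [ih (List.nodup_cons.mp hnd).2]
        have : (x ∈ k :: ks) = (x ∈ ks) := by
          simp [List.mem_cons, Ne.symm hx]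
        by_cases hm : x ∈ ks
        · simp [hm, Ne.symm hx]
        · simp [hm, Ne.symm hx]

lemma items_mkDict (P : List (List (List Bool))) (done : List (List Bool)) :
    (mkDict P done).items = (PySem.Set.ofList (P.flatten ++ done)).map
      (fun k => (k, (k, occAux P 0 k ++ if 0 < done.count k then [(P.length : Int)] else []))) := rfl

lemma bInner_step (P : List (List (List Bool))) (done : List (List Bool)) (imp : List Bool) :
    bInner (P.length : Int) (mkDict P done) imp = mkDict P (done ++ [imp]) := by
  have hnd : (PySem.Set.ofList (P.flatten ++ done)).Nodup := PySem.Set.nodup_ofList _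
  have hget := get?_mk_map (PySem.Set.ofList (P.flatten ++ done))
    (fun k => (k, occAux P 0 k ++ if 0 < done.count k then [(P.length : Int)] else [])) hnd imp
  have hset : PySem.Set.ofList (P.flatten ++ (done ++ [imp]))
      = PySem.Set.add (PySem.Set.ofList (P.flatten ++ done)) imp := by
    rw [← List.append_assoc, PySem.Set.ofList_append_singleton]
  by_cases hmem : imp ∈ PySem.Set.ofList (P.flatten ++ done)
  · -- key already present
    have hgets : (mkDict P done).get? imp
        = some (imp, occAux P 0 imp ++ if 0 < done.count imp then [(P.length : Int)] else []) := by
      rw [mkDict, hget, if_pos hmem]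
    have hc : (mkDict P done).contains imp = true := by
      rw [PySem.Dict.contains_eq_isSome_get?, hgets]; rfl
    have hgetD : (mkDict P done).getD imp (imp, [])
        = (imp, occAux P 0 imp ++ if 0 < done.count imp then [(P.length : Int)] else []) := by
      rw [PySem.Dict.getD_eq_get?_getD, hgets]; rfl
    have hS' : PySem.Set.ofList (P.flatten ++ (done ++ [imp]))
        = PySem.Set.ofList (P.flatten ++ done) := by
      rw [hset, PySem.Set.add_of_mem hmem]
    unfold bInner
    rw [hc, if_pos rfl]
    simp only [hgetD]
    by_cases hdone : 0 < done.count imp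
    · -- last recorded index is P.length: no change
      have hlast : PySem.List.pyGetD
          (occAux P 0 imp ++ if 0 < done.count imp then [(P.length : Int)] else []) (-1) 0
          = (P.length : Int) := by
        rw [if_pos hdone, PySem.List.pyGetD_neg_one_append_singleton]
      rw [if_neg (by rw [hlast]; exact not_not_intro rfl)]
      apply PySem.Dict.ext
      rw [items_mkDict, items_mkDict, hS']
      apply List.map_congr_left
      intro k hk
      by_cases hki : k = imp
      · subst hki
        have h2 : 0 < (done ++ [k]).count k := List.count_pos_iff.mpr (by simp)
        rw [if_pos hdone, if_pos h2]
      · have h2 : (done ++ [imp]).count k = done.count k := by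
          rw [List.count_append, List.count_singleton]
          simp [Ne.symm hki]
        rw [h2]
    · -- imp seen in an earlier list only: append P.length
      have himpP : imp ∈ P.flatten := by
        have := (PySem.Set.mem_ofList _ _).mp hmem
        rcases List.mem_append.mp this with h | h
        · exact h
        · exact absurd (List.count_pos_iff.mpr h) hdone
      have hocc : occAux P 0 imp ≠ [] := fun h => (occ_nil_iff _ _ _).mp h himpP
      have hlast : PySem.List.pyGetD
          (occAux P 0 imp ++ if 0 < done.count imp then [(P.length : Int)] else []) (-1) 0
          ≠ (P.length : Int) := by
        rw [if_neg hdone, List.append_nil, PySem.List.pyGetD_neg_one _ _ hocc]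
        have hmemlast := List.getLast_mem hocc
        have := occ_bounds imp P 0 _ hmemlast
        omega
      rw [if_pos hlast]
      apply PySem.Dict.ext
      rw [PySem.Dict.items_insert_of_contains _ _ hc, items_mkDict, items_mkDict, hS',
        List.map_map]
      apply List.map_congr_left
      intro k hk
      by_cases hki : k = imp
      · subst hki
        have h2 : 0 < (done ++ [k]).count k := List.count_pos_iff.mpr (by simp)
        simp only [Function.comp, beq_self_eq_true, if_pos trivial, if_neg hdone, if_pos h2,
          List.append_nil]
      · have h2 : (done ++ [imp]).count k = done.count k := by
          rw [List.count_append, List.count_singleton]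
          simp [Ne.symm hki]
        have hbeq : (k == imp) = false := by simp [hki]
        simp only [Function.comp, hbeq, Bool.false_eq_true, if_false, h2]
  · -- new key: append to the dict
    have hgets : (mkDict P done).get? imp = none := by
      rw [mkDict, hget, if_neg hmem]
    have hc : (mkDict P done).contains imp = false := by
      rw [PySem.Dict.contains_eq_isSome_get?, hgets]; rfl
    have himpP : imp ∉ P.flatten := fun h =>
      hmem ((PySem.Set.mem_ofList _ _).mpr (List.mem_append_left _ h))
    have himpd : imp ∉ done := fun h =>
      hmem ((PySem.Set.mem_ofList _ _).mpr (List.mem_append_right _ h))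
    have hoccP : occAux P 0 imp = [] := (occ_nil_iff _ _ _).mpr himpP
    unfold bInner
    rw [hc]
    simp only [Bool.false_eq_true, if_false]
    apply PySem.Dict.ext
    rw [PySem.Dict.items_insert_of_not_contains _ _ hc, items_mkDict, items_mkDict, hset,
      PySem.Set.add_of_not_mem hmem, List.map_append]
    congr 1
    · apply List.map_congr_left
      intro k hk
      have hki : k ≠ imp := fun h => hmem (h ▸ hk)
      have h2 : (done ++ [imp]).count k = done.count k := by
        rw [List.count_append, List.count_singleton]
        simp [Ne.symm hki]
      rw [h2]
    · have h2 : 0 < (done ++ [imp]).count imp := by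
        rw [List.count_append, List.count_singleton]
        simp
      simp [hoccP]

lemma bInner_fold (P : List (List (List Bool))) :
    ∀ (fset done : List (List Bool)),
    fset.foldl (bInner (P.length : Int)) (mkDict P done) = mkDict P (done ++ fset) := by
  intro fset
  induction fset with
  | nil => intro done; simp
  | cons imp rest ih =>
      intro done
      rw [List.foldl_cons, bInner_step, ih (done ++ [imp])]
      simp

lemma mkDict_nil (P : List (List (List Bool))) : mkDict P [] = dictOf P := by
  unfold mkDict dictOf
  simp

lemma mkDict_full (P : List (List (List Bool))) (fset : List (List Bool)) :
    mkDict P fset = dictOf (P ++ [fset]) := by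
  unfold mkDict dictOf
  have hf : (P ++ [fset]).flatten = P.flatten ++ fset := by simp
  rw [hf]
  congr 1
  apply List.map_congr_left
  intro k hk
  rw [occ_append]
  simp [occAux, zero_add]

lemma bOuter_fold : ∀ (M P : List (List (List Bool))),
    (PySem.List.enumerate M (P.length : Int)).foldl bOuter (dictOf P) = dictOf (P ++ M) := by
  intro M
  induction M with
  | nil => intro P; simp [PySem.List.enumerate_nil]
  | cons fset M' ih =>
      intro P
      rw [PySem.List.enumerate_cons, List.foldl_cons]
      have h1 : bOuter (dictOf P) ((P.length : Int), fset) = dictOf (P ++ [fset]) := by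
        show fset.foldl (bInner (P.length : Int)) (dictOf P) = _
        rw [← mkDict_nil]
        have h2 := bInner_fold P fset []
        rw [List.nil_append] at h2
        rw [h2, mkDict_full]
      rw [h1]
      have hlen : (P.length : Int) + 1 = (((P ++ [fset]).length : Nat) : Int) := by
        simp [List.length_append]
      rw [hlen, ih (P ++ [fset])]
      congr 1
      simp

lemma lit_fold (imp : List Bool) :
    ∀ (M : List Bool) (a : Nat), imp.drop a = M → ∀ (acc : List Char),
    (PySem.List.enumerate M (a : Int)).foldl (fun acc kb =>
      acc ++ ((if !kb.2 then ['!'] else []) ++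
        (if kb.1 < 3 then 't' :: PySem.Int.toChars (kb.1 + 1)
         else 'x' :: PySem.Int.toChars (kb.1 + 1 - 3)))) acc
    = (PySem.List.pyRange (a : Int) (imp.length : Int) 1).foldl (fun res k =>
        res ++ ((if !(PySem.List.pyGetD imp k false) then ['!'] else []) ++
          (if k < 3 then ['t'] else ['x']) ++
          (if k < 3 then PySem.Int.toChars (k + 1) else PySem.Int.toChars (k + 1 - 3)))) acc := by
  intro M
  induction M with
  | nil =>
      intro a h acc
      have hle : imp.length ≤ a := by
        by_contra hc
        push_neg at hc
        have := List.drop_eq_nil_iff.mp h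
        omega
      rw [PySem.List.pyRange_one_eq_nil (by exact_mod_cast hle), PySem.List.enumerate_nil]
      rfl
  | cons b M' ih =>
      intro a h acc
      have ha : a < imp.length := by
        by_contra hc
        push_neg at hc
        rw [List.drop_eq_nil_iff.mpr hc] at h
        simp at h
      have hb : imp[a] = b := by
        have := congrArg (fun t => t.head?) h
        simpa [List.head?_drop, List.getElem?_eq_getElem ha] using this
      have hdrop : imp.drop (a + 1) = M' := by
        have := congrArg List.tail h
        simpa [List.tail_drop] using this
      have hgd : PySem.List.pyGetD imp (a : Int) false = b := by
        simp [PySem.List.pyGetD_natCast, List.getD_eq_getElem?_getD,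
          List.getElem?_eq_getElem ha, hb]
      rw [PySem.List.enumerate_cons, PySem.List.pyRange_one_cons (by exact_mod_cast ha),
        List.foldl_cons, List.foldl_cons]
      have hpiece : acc ++ ((if !b then ['!'] else []) ++
            (if (a : Int) < 3 then 't' :: PySem.Int.toChars ((a : Int) + 1)
             else 'x' :: PySem.Int.toChars ((a : Int) + 1 - 3)))
          = acc ++ ((if !(PySem.List.pyGetD imp (a : Int) false) then ['!'] else []) ++
            (if (a : Int) < 3 then ['t'] else ['x']) ++
            (if (a : Int) < 3 then PySem.Int.toChars ((a : Int) + 1)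
             else PySem.Int.toChars ((a : Int) + 1 - 3))) := by
        rw [hgd]
        by_cases h3 : (a : Int) < 3 <;> simp [h3, List.append_assoc]
      rw [hpiece]
      have hcast : (a : Int) + 1 = ((a + 1 : Nat) : Int) := by push_cast; ring
      rw [hcast]
      exact ih (a + 1) hdrop _

lemma lit_eq (imp : List Bool) :
    (PySem.List.enumerate imp 0).foldl (fun acc kb =>
      acc ++ ((if !kb.2 then ['!'] else []) ++
        (if kb.1 < 3 then 't' :: PySem.Int.toChars (kb.1 + 1)
         else 'x' :: PySem.Int.toChars (kb.1 + 1 - 3)))) []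
    = implicantaChars imp := by
  have h := lit_fold imp imp 0 rfl []
  simp only [Nat.cast_zero] at h
  rw [h]
  unfold implicantaChars
  simp only [PySem.List.len_eq]

lemma bEmit_fold : ∀ (ps : List (List Bool × List Int)) (I : List (List Bool))
    (J : List (List Int)) (parts : List (List Char)) (c : Int),
    ps.foldl bEmit (I, J, parts, c)
    = (I ++ ps.map (·.1), J ++ ps.map (·.2), parts ++ chunkList ps c, c + ps.length) := by
  intro ps
  induction ps with
  | nil => intro I J parts c; simp [chunkList]
  | cons v ps ih =>
      intro I J parts c
      rw [List.foldl_cons]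
      have hb : bEmit (I, J, parts, c) v
          = (I ++ [v.1], J ++ [v.2], parts ++ [chunk c v.1 v.2], c + 1) := by
        unfold bEmit chunk
        rw [lit_eq v.1]
      rw [hb, ih]
      simp [chunkList, List.append_assoc, List.length_cons]
      omega

lemma B_eq (L : List (List (List Bool))) :
    get_lst_str_set_of_full_alt L
    = (PySem.Set.ofList L.flatten, (PySem.Set.ofList L.flatten).map (occAux L 0),
       String.ofList ((chunkList (pairsOf L) 1).flatten)) := by
  have hd := bOuter_fold L []
  have hnil : dictOf [] = PySem.Dict.empty := rfl
  rw [hnil, List.nil_append] at hd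
  simp only [List.length_nil, Nat.cast_zero] at hd
  have hvals : (dictOf L).values = pairsOf L := by
    show ((PySem.Set.ofList L.flatten).map _).map _ = _
    rw [List.map_map]
    rfl
  unfold get_lst_str_set_of_full_alt
  rw [hd, hvals, bEmit_fold]
  unfold bFinish
  simp only [pairsOf, List.map_map, join_nil_flatten, List.nil_append]
  refine congrArg₂ Prod.mk ?_ (congrArg₂ Prod.mk ?_ rfl)
  · exact List.map_id _
  · rfl

-- ===== VERDICT (by name: the statement is the Claim_ definition above) =====
theorem get_lst_str_set_of_full_spec : Claim_equal_get_lst_str_set_of_full := by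
  intro func_lst _
  unfold Spec_get_lst_str_set_of_full
  rw [A_eq, B_eq]
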